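-- pv_equiv track=rewrite | github.com/henriquem27/School-Projects | CS220/BSsets.py | s11x
-- ===== SOURCE A (Python) =====
-- def stringn(n,c):
--     c=str(c)
--     return n*c
--
--     '''
--   given bit string bs of size n,
--   return the next (boolean increment)
--   e.g.  '00000' -> '00001'
--         '01011' -> '01100'
--         '11111' -> '00000'
--     '''
--
-- def next(bs,n):
--     return '{:0{}b}'.format(int(bs, 2) + 1, n)[-n:]
--
--
--     '''
--     return the set of all length n>=2 bitstrings
--     that start with '11' or end with '1'
--
--     '''
--
-- def s11x(n):
--     l=[]
--
--     x=stringn(n,0)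
--     l.append(x)
--     i=1
--     while i<(2**n):
--         x=next(x,n)
--         l.append(x)
--         i=i+1
--
--     subs='11'
--
--     res = [x for x in l if x.startswith(subs)]
--
--
--     return set(res)
--
--
--     '''
--    return the set of all length n>=2 bitstrings
--    that end with '1'
--     '''
-- ===== SOURCE B (Python) =====
-- def s11x(n):
--     if n < 2:
--         return set()
--     suffixes = ['']
--     for _ in range(n - 2):
--         suffixes = [s + b for s in suffixes for b in '01']
--     return {'11' + s for s in suffixes}
-- ===== Notes on version B (the rewrite author's own statement) =====
-- stated objective: faster
-- what changed: B generates only the 2^(n-2) matching strings by repeatedly extending suffixes of '11' with '0'/'1', instead of enumerating all 2^n bitstrings via parse-increment-format and filtering for the '11' prefix.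
import Mathlib
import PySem

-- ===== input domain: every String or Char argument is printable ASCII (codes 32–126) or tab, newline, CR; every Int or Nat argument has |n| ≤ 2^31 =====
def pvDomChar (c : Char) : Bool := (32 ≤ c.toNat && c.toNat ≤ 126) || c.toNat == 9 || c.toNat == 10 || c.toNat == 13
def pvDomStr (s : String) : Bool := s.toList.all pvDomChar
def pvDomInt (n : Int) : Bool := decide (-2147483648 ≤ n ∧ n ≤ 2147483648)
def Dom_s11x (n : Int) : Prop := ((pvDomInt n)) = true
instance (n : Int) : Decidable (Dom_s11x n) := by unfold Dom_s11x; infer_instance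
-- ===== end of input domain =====

-- B generates only the 2^(n-2) matching strings by extending suffixes of '11',
-- instead of enumerating all 2^n bitstrings via parse/increment/format and filtering.


-- ===== PORT A =====
-- Python strings are carried as List Char (the PySem convention) and wrapped with
-- String.ofList where the result list is built.

-- stringn(n, c) = n * str(c)
def stringnP (n : Int) (c : Int) : List Char :=
  PySem.List.pyRepeat (PySem.Int.toChars c) n

-- int(bs, 2), hand-ported: exact for the nonempty '0'/'1' strings that are the only
-- arguments s11x's loop ever passes to next (PySem.Int.ofCharsBase? is the general
-- primitive, but its parser internals are private to the prelude, so this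
-- proof-transparent form is used; on any other string Python raises ValueError,
-- which s11x never triggers).
def parseBin2 (cs : List Char) : Int :=
  cs.foldl (fun a c => a * 2 + (if c == '1' then 1 else 0)) 0

-- next(bs, n) = '{:0{}b}'.format(int(bs, 2) + 1, n)[-n:]
-- '{:0{}b}'.format(v, n) for the positive v produced here is format(v,'b') zero-filled
-- to width n: PySem.Chars.zfill (PySem.Int.toBinChars v) n.
def nextP (bs : List Char) (n : Int) : List Char :=
  PySem.List.slice (PySem.Chars.zfill (PySem.Int.toBinChars (parseBin2 bs + 1)) n) (some (-n)) none

-- the while loop: i counts up while i < 2**n (bound = 2**n, precomputed by the caller)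
-- fuel = bound makes the recursion structural; it never runs out (i starts at 1)
def s11xLoop (n : Int) (bound : Nat) (fuel : Nat) (x : List Char) (i : Nat)
    (acc : List (List Char)) : List (List Char) :=
  match fuel with
  | 0 => acc
  | fuel + 1 =>
    if i < bound then
      let x' := nextP x n
      s11xLoop n bound fuel x' (i + 1) (acc ++ [x'])
    else acc

def s11x (n : Int) : List String :=
  let x := stringnP n 0
  let l := [x]
  -- while i < 2**n: for n < 0 Python's 2**n is a float in (0,1), so with i = 1 the
  -- loop body never runs; that is rendered by the bound 0
  let bound : Nat := if n < 0 then 0 else 2 ^ n.toNat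
  let subs : List Char := ['1', '1']    -- "11"
  let res := (s11xLoop n bound bound x 1 l).filter (fun s => PySem.Chars.startswith s subs)
  PySem.Set.ofList (res.map String.ofList)

-- ===== PORT B =====
def s11x_alt (n : Int) : List String :=
  if n < 2 then []
  else
    let suffixes := (PySem.List.pyRange 0 (n - 2) 1).foldl
      (fun acc _ => acc.flatMap (fun s => [s ++ ['0'], s ++ ['1']])) [([] : List Char)]
    PySem.Set.ofList (suffixes.map (fun s => String.ofList ('1' :: '1' :: s)))

-- ===== PRECONDITION & SPEC =====
def Spec_s11x (n : Int) (out : List String) : Prop := out = s11x_alt n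
instance (n : Int) (out : List String) : Decidable (Spec_s11x n out) := by unfold Spec_s11x; infer_instance

-- ===== CLAIM (what is proved, stated in full; the proofs are below) =====
def Claim_equal_s11x : Prop := ∀ (n : Int), Dom_s11x n → Spec_s11x n (s11x n)

-- ===== LEMMAS AND PROOFS =====

-- the width-k binary string of v (MSB first), the common form of both sides
def binL : Nat → Nat → List Char
  | 0, _ => []
  | k + 1, v => binL k (v / 2) ++ [Nat.digitChar (v % 2)]

theorem length_binL (k v : Nat) : (binL k v).length = k := by
  induction k generalizing v with
  | zero => simp [binL]
  | succ k ih => simp [binL, ih]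

theorem binL_zero (k : Nat) : binL k 0 = List.replicate k '0' := by
  induction k with
  | zero => simp [binL]
  | succ k ih => simp [binL, ih, List.replicate_succ']; rfl

-- format(m,'b') without padding, as produced by Nat.toDigits 2
def natBits (m : Nat) : List Char :=
  if m < 2 then [Nat.digitChar m]
  else natBits (m / 2) ++ [Nat.digitChar (m % 2)]
termination_by m
decreasing_by exact Nat.div_lt_self (by omega) (by omega)

theorem natBits_ne_nil (m : Nat) : natBits m ≠ [] := by
  unfold natBits; split <;> simp

theorem mem_natBits (m : Nat) : ∀ c ∈ natBits m, c = '0' ∨ c = '1' := by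
  induction m using Nat.strong_induction_on with
  | _ m ih =>
    unfold natBits
    split
    · rename_i h
      intro c hc
      simp at hc
      subst hc
      interval_cases m
      · left; decide
      · right; decide
    · rename_i h
      intro c hc
      rcases List.mem_append.1 hc with hc | hc
      · exact ih (m / 2) (Nat.div_lt_self (by omega) (by omega)) c hc
      · simp at hc
        subst hc
        rcases Nat.mod_two_eq_zero_or_one m with h2 | h2 <;> rw [h2]
        · left; decide
        · right; decide

theorem toDigitsCore_eq_natBits (f : Nat) : ∀ n ds, 0 < n → n < f →
    Nat.toDigitsCore 2 f n ds = natBits n ++ ds := by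
  induction f with
  | zero => intro n ds h1 h2; omega
  | succ f ih =>
    intro n ds h1 h2
    show (if n / 2 = 0 then (n % 2).digitChar :: ds
          else Nat.toDigitsCore 2 f (n / 2) ((n % 2).digitChar :: ds)) = _
    by_cases h : n / 2 = 0
    · have hn : n = 1 := by omega
      subst hn
      simp [natBits]
    · rw [if_neg h, ih (n / 2) _ (by omega) (by omega)]
      conv_rhs => rw [natBits]
      rw [if_neg (by omega), List.append_assoc, List.singleton_append]

theorem toDigits_eq_natBits (m : Nat) (h : 0 < m) : Nat.toDigits 2 m = natBits m := by
  have := toDigitsCore_eq_natBits (m + 1) m [] h (by omega)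
  simpa [Nat.toDigits] using this

-- zero-padding natBits m to width N is exactly binL N m
theorem padZero (N m : Nat) (h1 : 1 ≤ m) (h2 : m < 2 ^ N) :
    List.replicate (N - (natBits m).length) '0' ++ natBits m = binL N m := by
  induction N generalizing m with
  | zero => omega
  | succ K ih =>
    by_cases hm : m < 2
    · have hm1 : m = 1 := by omega
      subst hm1
      rw [natBits]
      simp [binL, binL_zero]
    · rw [natBits, if_neg (by omega)]
      have hd1 : 1 ≤ m / 2 := by omega
      have hd2 : m / 2 < 2 ^ K := by
        have h4 : 2 ^ (K + 1) = 2 ^ K * 2 := by ring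
        omega
      have heq := ih (m / 2) hd1 hd2
      rw [binL, ← heq, List.length_append, List.length_singleton]
      have hL : K + 1 - ((natBits (m / 2)).length + 1) = K - (natBits (m / 2)).length := by
        omega
      rw [hL, ← List.append_assoc]

-- parseBin2 reads binL N v back
theorem foldl_binL (k v : Nat) (a : Int) (h : v < 2 ^ k) :
    (binL k v).foldl (fun a c => a * 2 + (if c == '1' then 1 else 0)) a
      = a * 2 ^ k + v := by
  induction k generalizing v a with
  | zero =>
    have : v = 0 := by omega
    simp [binL, this]
  | succ k ih =>
    have hv : v / 2 < 2 ^ k := by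
      have h4 : 2 ^ (k + 1) = 2 ^ k * 2 := by ring
      omega
    rw [binL, List.foldl_append, ih (v / 2) a hv]
    simp only [List.foldl_cons, List.foldl_nil]
    have hmi : ((v : Int)) = 2 * ((v / 2 : Nat) : Int) + ((v % 2 : Nat) : Int) := by
      have hm : 2 * (v / 2) + v % 2 = v := by omega
      exact_mod_cast hm.symm
    rcases Nat.mod_two_eq_zero_or_one v with h2 | h2 <;> rw [h2] at hmi ⊢
    · rw [show (if Nat.digitChar 0 == '1' then (1 : Int) else 0) = 0 from by decide]
      rw [hmi, pow_succ]
      push_cast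
      ring
    · rw [show (if Nat.digitChar 1 == '1' then (1 : Int) else 0) = 1 from by decide]
      rw [hmi, pow_succ]
      push_cast
      ring

theorem parseBin2_binL (N v : Nat) (h : v < 2 ^ N) : parseBin2 (binL N v) = v := by
  unfold parseBin2
  rw [foldl_binL N v 0 h]
  ring

-- zfill on an unsigned digit string is plain left padding
theorem zfill_digits (cs : List Char) (w : Int) (hne : cs ≠ [])
    (hd : ∀ c ∈ cs, c = '0' ∨ c = '1') :
    PySem.Chars.zfill cs w = List.replicate (w.toNat - cs.length) '0' ++ cs := by
  unfold PySem.Chars.zfill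
  by_cases h : w ≤ (cs.length : Int)
  · rw [if_pos h]
    have : w.toNat - cs.length = 0 := by omega
    simp [this]
  · rw [if_neg h]
    match cs, hne with
    | c :: rest, _ =>
      have := hd c (by simp)
      have hcs : ¬ (c = '+' ∨ c = '-') := by
        rcases this with h' | h' <;> subst h' <;> decide
      simp only []
      rw [if_neg hcs]

-- next on a width-N binary string increments it
theorem nextP_binL (n : Int) (N m : Nat) (hn : n.toNat = N) (h1 : 1 ≤ N)
    (h2 : m + 1 < 2 ^ N) :
    nextP (binL N m) n = binL N (m + 1) := by
  have hm : m < 2 ^ N := by omega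
  unfold nextP
  rw [parseBin2_binL N m hm]
  have hpos : (0 : Int) < (m : Int) + 1 := by positivity
  have htb : PySem.Int.toBinChars ((m : Int) + 1) = Nat.toDigits 2 (m + 1) := by
    unfold PySem.Int.toBinChars
    rw [if_neg (by omega)]
    have ht : ((m : Int) + 1).toNat = m + 1 := by omega
    rw [ht]
  rw [htb, toDigits_eq_natBits (m + 1) (by omega)]
  rw [zfill_digits _ n (natBits_ne_nil _) (mem_natBits _)]
  have hn0 : (0 : Int) ≤ n := by omega
  have hnt : n.toNat = N := hn
  rw [hnt]
  have hpad := padZero N (m + 1) (by omega) h2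
  rw [hpad]
  have hlen : (binL N (m + 1)).length = N := length_binL N (m + 1)
  have hneg : -n = -(N : Int) := by omega
  rw [hneg, PySem.List.slice_from_neg_natCast _ N (by omega)]
  rw [hlen, Nat.sub_self, List.drop_zero]

-- the while loop, started on binL N (i-1), lists binL N i .. binL N (2^N - 1)
theorem s11xLoop_eq (n : Int) (N : Nat) (hn : n.toNat = N) (h1 : 1 ≤ N) :
    ∀ (fuel i : Nat) (acc : List (List Char)), 2 ^ N - i ≤ fuel → 1 ≤ i → i ≤ 2 ^ N →
    s11xLoop n (2 ^ N) fuel (binL N (i - 1)) i acc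
      = acc ++ (List.range' i (2 ^ N - i)).map (binL N) := by
  intro fuel
  induction fuel with
  | zero =>
    intro i acc hf hi1 hi2
    have : i = 2 ^ N := by omega
    subst this
    rw [s11xLoop]
    simp
  | succ fuel ih =>
    intro i acc hf hi1 hi2
    by_cases hlt : i < 2 ^ N
    · rw [s11xLoop, if_pos hlt]
      have hx : nextP (binL N (i - 1)) n = binL N i := by
        have := nextP_binL n N (i - 1) hn h1 (by omega)
        rwa [Nat.sub_add_cancel hi1] at this
      simp only [hx]
      have hrec := ih (i + 1) (acc ++ [binL N i]) (by omega) (by omega) (by omega)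
      have hi : i + 1 - 1 = i := by omega
      rw [hi] at hrec
      rw [hrec]
      have hr : 2 ^ N - i = (2 ^ N - (i + 1)) + 1 := by omega
      rw [hr, List.range'_succ]
      simp
    · have : i = 2 ^ N := by omega
      subst this
      rw [s11xLoop, if_neg (by omega)]
      simp

-- the full list l is all width-N binary strings in numeric order
theorem loop_all (N : Nat) :
    binL N 0 :: (List.range' 1 (2 ^ N - 1)).map (binL N)
      = (List.range (2 ^ N)).map (binL N) := by
  have h2 : 2 ^ N = (2 ^ N - 1) + 1 := by have := Nat.one_le_two_pow (n := N); omega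
  rw [List.range_eq_range', h2, List.range'_succ]
  simp

-- splitting a binary string at position 2 from the left
theorem binL_split (a : Nat) : ∀ (b i : Nat),
    binL (a + b) i = binL a (i / 2 ^ b) ++ binL b (i % 2 ^ b) := by
  intro b
  induction b with
  | zero => intro i; simp [binL]
  | succ b ih =>
    intro i
    show binL ((a + b) + 1) i = _
    rw [binL, ih (i / 2)]
    rw [binL]
    have e1 : i / 2 / 2 ^ b = i / 2 ^ (b + 1) := by
      rw [Nat.div_div_eq_div_mul, pow_succ']
    have e2 : i / 2 % 2 ^ b = i % 2 ^ (b + 1) / 2 := by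
      rw [pow_succ']
      rw [Nat.mod_mul_right_div_self]
    have e3 : i % 2 ^ (b + 1) % 2 = i % 2 := by
      apply Nat.mod_mod_of_dvd
      exact dvd_pow_self 2 (by omega)
    rw [e1, e2, e3, List.append_assoc]

-- which width-(K+2) strings start with "11"
theorem startswith_binL (K i : Nat) (h : i < 2 ^ (K + 2)) :
    PySem.Chars.startswith (binL (K + 2) i) ['1', '1'] = decide (3 * 2 ^ K ≤ i) := by
  have hP : 0 < 2 ^ K := Nat.two_pow_pos K
  have h4 : 2 ^ (K + 2) = 4 * 2 ^ K := by ring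
  have hsplit : binL (K + 2) i = binL 2 (i / 2 ^ K) ++ binL K (i % 2 ^ K) := by
    have := binL_split 2 K i
    rwa [Nat.add_comm 2 K] at this
  by_cases h3 : 3 * 2 ^ K ≤ i
  · have hq3 : i / 2 ^ K = 3 := Nat.div_eq_of_lt_le h3 (by omega)
    rw [hsplit, hq3]
    rw [show binL 2 3 = ['1', '1'] from by decide]
    rw [decide_eq_true h3]
    simp [PySem.Chars.startswith_iff, List.cons_prefix_cons]
  · have hq3 : i / 2 ^ K < 3 := by
      rw [Nat.div_lt_iff_lt_mul hP]
      omega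
    rw [hsplit]
    rw [decide_eq_false h3, Bool.eq_false_iff]
    intro hcontra
    rw [PySem.Chars.startswith_iff] at hcontra
    have hcases : i / 2 ^ K = 0 ∨ i / 2 ^ K = 1 ∨ i / 2 ^ K = 2 := by
      generalize i / 2 ^ K = q at hq3 ⊢
      omega
    have hb : binL 2 (i / 2 ^ K) = ['0', '0'] ∨ binL 2 (i / 2 ^ K) = ['0', '1'] ∨
        binL 2 (i / 2 ^ K) = ['1', '0'] := by
      rcases hcases with h' | h' | h' <;> rw [h']
      · left; decide
      · right; left; decide
      · right; right; decide
    rcases hb with h' | h' | h' <;> rw [h'] at hcontra <;>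
      simp [List.cons_prefix_cons] at hcontra

-- filtering the full enumeration leaves the 2^K strings 11⬝suffix in order
theorem filter_eq (K : Nat) :
    ((List.range (2 ^ (K + 2))).map (binL (K + 2))).filter
        (fun s => PySem.Chars.startswith s ['1', '1'])
      = (List.range (2 ^ K)).map (fun j => '1' :: '1' :: binL K j) := by
  rw [List.filter_map]
  have hsplit4 : 2 ^ (K + 2) = 3 * 2 ^ K + 2 ^ K := by ring
  rw [hsplit4, List.range_add]
  rw [List.filter_append]
  have hleft : (List.range (3 * 2 ^ K)).filter
      ((fun s => PySem.Chars.startswith s ['1', '1']) ∘ binL (K + 2)) = [] := by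
    rw [List.filter_eq_nil_iff]
    intro i hi
    rw [List.mem_range] at hi
    simp only [Function.comp]
    have h4 : 2 ^ (K + 2) = 4 * 2 ^ K := by ring
    rw [startswith_binL K i (by omega)]
    simp
    omega
  have hright : ((List.range (2 ^ K)).map (fun x => 3 * 2 ^ K + x)).filter
      ((fun s => PySem.Chars.startswith s ['1', '1']) ∘ binL (K + 2)) =
      (List.range (2 ^ K)).map (fun x => 3 * 2 ^ K + x) := by
    rw [List.filter_eq_self]
    intro i hi
    rw [List.mem_map] at hi
    obtain ⟨j, hj, rfl⟩ := hi
    rw [List.mem_range] at hj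
    simp only [Function.comp]
    have h4 : 2 ^ (K + 2) = 4 * 2 ^ K := by ring
    rw [startswith_binL K (3 * 2 ^ K + j) (by omega)]
    simp
  rw [hleft, hright]
  simp only [List.nil_append, List.map_map]
  apply List.map_congr_left
  intro j hj
  rw [List.mem_range] at hj
  simp only [Function.comp]
  have := binL_split 2 K (3 * 2 ^ K + j)
  rw [Nat.add_comm 2 K] at this
  have hP : 0 < 2 ^ K := Nat.two_pow_pos K
  have e1 : (3 * 2 ^ K + j) / 2 ^ K = 3 := Nat.div_eq_of_lt_le (by omega) (by omega)
  have e2 : (3 * 2 ^ K + j) % 2 ^ K = j := by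
    rw [Nat.add_comm, Nat.add_mul_mod_self_right]
    exact Nat.mod_eq_of_lt hj
  rw [this, e1, e2]
  have : binL 2 3 = ['1', '1'] := by decide
  rw [this]
  rfl

-- B's doubling step
theorem doubling (m : Nat) (g : Nat → List Char) :
    (List.range (2 * m)).map g
      = (List.range m).flatMap (fun j => [g (2 * j), g (2 * j + 1)]) := by
  induction m with
  | zero => simp
  | succ m ih =>
    have : 2 * (m + 1) = 2 * m + 1 + 1 := by ring
    rw [this, List.range_succ, List.range_succ, List.range_succ]
    simp [ih]

theorem bStep (k : Nat) :
    ((List.range (2 ^ k)).map (binL k)).flatMap (fun s => [s ++ ['0'], s ++ ['1']])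
      = (List.range (2 ^ (k + 1))).map (binL (k + 1)) := by
  rw [List.flatMap_map]
  have h2 : 2 ^ (k + 1) = 2 * 2 ^ k := by ring
  rw [h2, doubling (2 ^ k) (binL (k + 1))]
  apply List.flatMap_congr
  intro j hj
  rw [List.mem_range] at hj
  have e0 : binL (k + 1) (2 * j) = binL k j ++ ['0'] := by
    rw [binL]
    have : 2 * j / 2 = j := by omega
    have h2 : 2 * j % 2 = 0 := by omega
    rw [this, h2]
    rfl
  have e1 : binL (k + 1) (2 * j + 1) = binL k j ++ ['1'] := by
    rw [binL]
    have : (2 * j + 1) / 2 = j := by omega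
    have h2 : (2 * j + 1) % 2 = 1 := by omega
    rw [this, h2]
    rfl
  rw [e0, e1]

theorem bFold : ∀ (l : List Int) (k : Nat),
    l.foldl (fun acc _ => acc.flatMap (fun s => [s ++ ['0'], s ++ ['1']]))
        ((List.range (2 ^ k)).map (binL k))
      = (List.range (2 ^ (k + l.length))).map (binL (k + l.length)) := by
  intro l
  induction l with
  | nil => intro k; simp
  | cons x xs ih =>
    intro k
    rw [List.foldl_cons, bStep k, ih (k + 1)]
    have hlen : k + 1 + xs.length = k + (x :: xs).length := by
      rw [List.length_cons]; omega
    rw [hlen]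

theorem s11x_small_0 : s11x 0 = [] := by decide

theorem s11x_small_1 : s11x 1 = [] := by decide

theorem s11x_neg (n : Int) (hneg : n < 0) : s11x n = [] := by
  have hx : stringnP n 0 = [] := by
    unfold stringnP
    rw [show PySem.Int.toChars 0 = ['0'] from rfl, PySem.List.pyRepeat_singleton]
    rw [show n.toNat = 0 from by omega]
    rfl
  simp only [s11x, if_pos hneg, hx]
  rw [s11xLoop]
  rfl

-- ===== VERDICT (by name: the statement is the Claim_ definition above) =====
theorem s11x_spec : Claim_equal_s11x := by
  intro n _
  unfold Spec_s11x
  by_cases hn2 : n < 2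
  · rw [s11x_alt, if_pos hn2]
    rcases lt_or_ge n 0 with hneg | hge
    · exact s11x_neg n hneg
    · interval_cases n
      · exact s11x_small_0
      · exact s11x_small_1
  · -- n ≥ 2
    obtain ⟨K, hK⟩ : ∃ K, n.toNat = K + 2 := ⟨n.toNat - 2, by omega⟩
    -- A side
    have hb : (if n < 0 then (0 : Nat) else 2 ^ n.toNat) = 2 ^ (K + 2) := by
      rw [if_neg (by omega), hK]
    have hx : stringnP n 0 = binL (K + 2) 0 := by
      unfold stringnP
      rw [show PySem.Int.toChars 0 = ['0'] from rfl, PySem.List.pyRepeat_singleton, hK,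
        binL_zero]
    have hloop := s11xLoop_eq n (K + 2) hK (by omega) (2 ^ (K + 2)) 1
      [binL (K + 2) 0] (by omega) (by omega) Nat.one_le_two_pow
    simp only [s11x, hb, hx]
    rw [hloop, List.singleton_append, loop_all (K + 2), filter_eq K]
    -- B side
    rw [s11x_alt, if_neg hn2]
    have hr : PySem.List.pyRange 0 (n - 2) 1 = List.map (fun k : Nat => (k : Int)) (List.range K) := by
      rw [show n - 2 = ((K : Nat) : Int) from by omega, PySem.List.pyRange_zero_natCast]
    simp only [hr]
    rw [show [([] : List Char)] = (List.range (2 ^ 0)).map (binL 0) from rfl]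
    rw [bFold ((List.range K).map (fun k : Nat => (k : Int))) 0]
    rw [show ((List.range K).map (fun k : Nat => (k : Int))).length = K from by
      rw [List.length_map, List.length_range]]
    simp only [Nat.zero_add, List.map_map]
    rfl
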